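-- pv_equiv track=rewrite | github.com/bobgel12/farm-management | backend/houses/services/monitoring_service.py | _determine_alarm_severity
-- ===== SOURCE A (Python) =====
-- def _determine_alarm_severity(message: str) -> str:
--     """Determine alarm severity from message"""
--     message_lower = message.lower()
--     if any(word in message_lower for word in ['critical', 'emergency', 'danger', 'fatal']):
--         return 'critical'
--     elif any(word in message_lower for word in ['high', 'severe', 'urgent']):
--         return 'high'
--     elif any(word in message_lower for word in ['warning', 'alert', 'caution']):
--         return 'medium'
--     return 'low'
-- ===== SOURCE B (Python) =====
-- _RANKS = {
--     'critical': 3, 'emergency': 3, 'danger': 3, 'fatal': 3,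
--     'high': 2, 'severe': 2, 'urgent': 2,
--     'warning': 1, 'alert': 1, 'caution': 1,
-- }
-- _LABELS = ['low', 'medium', 'high', 'critical']
--
--
-- def _determine_alarm_severity(message: str) -> str:
--     """Determine alarm severity: max numeric rank of any keyword present."""
--     m = message.lower()
--     best = 0
--     for word, rank in _RANKS.items():
--         if word in m:
--             best = max(best, rank)
--     return _LABELS[best]
-- ===== Notes on version B (the rewrite author's own statement) =====
-- stated objective: alternative
-- what changed: Replaced the priority-ordered early-return if/elif cascade by a single accumulator pass: every keyword carries a numeric rank, one flat fold takes the maximum rank found in the message, and the result indexes a label table (order of checks no longer matters).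
import Mathlib
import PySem

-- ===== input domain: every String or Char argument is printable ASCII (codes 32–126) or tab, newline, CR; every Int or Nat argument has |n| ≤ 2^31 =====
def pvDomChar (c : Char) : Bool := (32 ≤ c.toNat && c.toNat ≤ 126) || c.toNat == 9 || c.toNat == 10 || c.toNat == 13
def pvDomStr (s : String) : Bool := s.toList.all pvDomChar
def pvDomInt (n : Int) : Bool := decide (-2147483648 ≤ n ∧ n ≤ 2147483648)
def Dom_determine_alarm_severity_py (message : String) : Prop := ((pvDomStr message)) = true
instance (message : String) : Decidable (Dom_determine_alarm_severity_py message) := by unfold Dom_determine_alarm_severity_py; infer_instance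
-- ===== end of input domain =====

-- ===== PORT A =====
-- B replaces A's priority-ordered early-return cascade by one accumulator pass taking the max numeric rank of any keyword present; alternative decomposition, same outputs.
def determine_alarm_severity_py (message : String) : String :=
  let message_lower := PySem.Str.lower message
  if (["critical", "emergency", "danger", "fatal"] : List String).any (fun word => PySem.Str.isIn word message_lower) then
    "critical"
  else if (["high", "severe", "urgent"] : List String).any (fun word => PySem.Str.isIn word message_lower) then
    "high"
  else if (["warning", "alert", "caution"] : List String).any (fun word => PySem.Str.isIn word message_lower) then
    "medium"
  else
    "low"

-- ===== PORT B =====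
def rankTable : List (String × Nat) :=
  [("critical", 3), ("emergency", 3), ("danger", 3), ("fatal", 3),
   ("high", 2), ("severe", 2), ("urgent", 2),
   ("warning", 1), ("alert", 1), ("caution", 1)]

def severityLabels : List String := ["low", "medium", "high", "critical"]

def determine_alarm_severity_py_alt (message : String) : String :=
  let m := PySem.Str.lower message
  let best := rankTable.foldl
    (fun best wr => if PySem.Str.isIn wr.1 m then max best wr.2 else best) 0
  severityLabels.getD best "low"

-- ===== PRECONDITION & SPEC =====
def Spec_determine_alarm_severity_py (message : String) (out : String) : Prop := out = determine_alarm_severity_py_alt message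
instance (message : String) (out : String) : Decidable (Spec_determine_alarm_severity_py message out) := by unfold Spec_determine_alarm_severity_py; infer_instance

-- ===== CLAIM =====
def Claim_equal_determine_alarm_severity_py : Prop := ∀ (message : String), Dom_determine_alarm_severity_py message → Spec_determine_alarm_severity_py message (determine_alarm_severity_py message)

-- ===== LEMMAS AND PROOFS =====

-- ===== VERDICT =====
theorem determine_alarm_severity_py_spec : Claim_equal_determine_alarm_severity_py := by
  intro message _
  unfold Spec_determine_alarm_severity_py determine_alarm_severity_py determine_alarm_severity_py_alt rankTable severityLabels
  simp only [List.any, List.foldl, Bool.or_eq_true]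
  generalize PySem.Str.isIn "critical" (PySem.Str.lower message) = b1
  generalize PySem.Str.isIn "emergency" (PySem.Str.lower message) = b2
  generalize PySem.Str.isIn "danger" (PySem.Str.lower message) = b3
  generalize PySem.Str.isIn "fatal" (PySem.Str.lower message) = b4
  generalize PySem.Str.isIn "high" (PySem.Str.lower message) = b5
  generalize PySem.Str.isIn "severe" (PySem.Str.lower message) = b6
  generalize PySem.Str.isIn "urgent" (PySem.Str.lower message) = b7
  generalize PySem.Str.isIn "warning" (PySem.Str.lower message) = b8
  generalize PySem.Str.isIn "alert" (PySem.Str.lower message) = b9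
  generalize PySem.Str.isIn "caution" (PySem.Str.lower message) = b10
  revert b1 b2 b3 b4 b5 b6 b7 b8 b9 b10
  decide
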